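-- pv_equiv track=rewrite | github.com/Advanced-AIgpt/Yandex-Full-Source | alice/uniproxy/library/backends_memcached/rtcdiscovery.py | _reorder_instances
-- ===== SOURCE A (Python) =====
-- def _reorder_instances(hosts):
--     dc_host_map = {}
--
--     for dc, host in [(host[:3], host) for host in hosts]:
--         if dc not in dc_host_map:
--             dc_host_map[dc] = []
--         dc_host_map[dc].append(host)
--
--     reordered_hosts = []
--
--     dcs = sorted(dc_host_map.keys())
--     for i in range(0, len(hosts)):
--         dc_index = i % len(dcs)
--         host = dc_host_map[dcs[dc_index]].pop()
--         reordered_hosts.append(host)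
--
--     return reordered_hosts
-- ===== SOURCE B (Python) =====
-- def _reorder_instances(hosts):
--     groups = {}
--     for h in hosts:
--         groups.setdefault(h[:3], []).append(h)
--     revs = [groups[k][::-1] for k in sorted(groups)]
--     n = len(hosts)
--     result = []
--     r = 0
--     while len(result) < n:
--         for rev in revs:
--             if len(result) == n:
--                 break
--             result.append(rev[r])
--         r += 1
--     return result
-- ===== Notes on version B (the rewrite author's own statement) =====
-- stated objective: alternative
-- what changed: A walks a flat i in range(n) loop, picking the DC by i % d and destructively popping each host from the end of its group; B reverses each DC group once up front and then emits round by round with a nested loop (round r, then each DC in sorted order), reading rev[r] instead of mutating, stopping when all hosts are placed.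
import Mathlib
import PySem

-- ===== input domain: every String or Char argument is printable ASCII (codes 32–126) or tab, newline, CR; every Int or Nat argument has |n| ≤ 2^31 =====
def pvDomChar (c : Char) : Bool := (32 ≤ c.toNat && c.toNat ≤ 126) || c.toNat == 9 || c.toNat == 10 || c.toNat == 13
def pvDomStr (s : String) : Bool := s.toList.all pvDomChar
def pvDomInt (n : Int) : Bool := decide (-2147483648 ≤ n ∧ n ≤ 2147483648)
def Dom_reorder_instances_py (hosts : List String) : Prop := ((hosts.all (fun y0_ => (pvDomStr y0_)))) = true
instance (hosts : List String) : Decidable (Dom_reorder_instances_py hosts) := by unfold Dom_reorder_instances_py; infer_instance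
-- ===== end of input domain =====

-- B replaces A's flat `for i in range(len(hosts))` with `i % d` arithmetic and destructive pops
-- by a round-by-round nested pass over the per-DC lists reversed once up front; same return value.

-- h[:3], the datacenter prefix (shared helper of both ports and of Pre_)
def pvPfx (h : String) : String := PySem.Str.slice h none (some 3)

-- ===== PORT A =====
def reorder_instances_py (hosts : List String) : List String :=
  let dcHostMap : PySem.Dict String (List String) :=
    (hosts.map (fun host => (pvPfx host, host))).foldl
      (fun d p =>
        let d := if d.contains p.1 then d else d.insert p.1 ([] : List String)
        d.modify p.1 [] (fun l => l ++ [p.2]))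
      PySem.Dict.empty
  let dcs := PySem.List.sorted dcHostMap.keys (fun x => x) false
  let res := (PySem.List.pyRange 0 (hosts.length : Int) 1).foldl
      (fun (st : PySem.Dict String (List String) × List String) i =>
        let key := PySem.List.pyGetD dcs (PySem.Int.mod i (dcs.length : Int)) ""
        match PySem.List.pop? (st.1.getD key []) (-1) with
        | some (h, rest) => (st.1.insert key rest, st.2 ++ [h])
        | none => st)   -- Python raises IndexError here; Pre_ excludes exactly these inputs
      (dcHostMap, [])
  res.2

-- ===== PORT B =====
-- the inner `for rev in revs: … result.append(rev[r])` pass of one round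
def pvBInner (n : Nat) (r : Nat) : List (List String) → List String → List String
  | [], acc => acc
  | rev :: rest, acc =>
    if acc.length = n then acc
    else pvBInner n r rest (acc ++ [PySem.List.pyGetD rev (r : Int) ""])  -- rev[r]; out of range ↔ Python's IndexError, excluded by Pre_

-- the outer `while len(result) < n` loop; fuel bounds the number of rounds (≤ n suffices)
def pvBOuter (n : Nat) (revs : List (List String)) : Nat → List String → Nat → List String
  | 0, acc, _ => acc
  | fuel+1, acc, r => if acc.length < n then pvBOuter n revs fuel (pvBInner n r revs acc) (r+1) else acc

def reorder_instances_py_alt (hosts : List String) : List String :=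
  let groups : PySem.Dict String (List String) :=
    hosts.foldl
      (fun d h => (d.setdefault (pvPfx h) []).modify (pvPfx h) [] (fun l => l ++ [h]))
      PySem.Dict.empty
  let revs := (PySem.List.sorted groups.keys (fun x => x) false).map (fun k => (groups.getD k []).reverse)
  pvBOuter hosts.length revs hosts.length [] 0

-- ===== PRECONDITION & SPEC =====
-- the rank of a DC prefix among the distinct prefixes (code-point order, stated on toList so it is kernel-decidable)
def pvRank (hosts : List String) (k : String) : Nat :=
  (PySem.List.dedup (hosts.map pvPfx)).countP (fun k' => decide (k'.toList < k.toList))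

-- Pre_ excludes exactly the inputs on which A raises IndexError (a DC group exhausted before the
-- round-robin finishes): A returns normally iff every DC's host count equals its round-robin share.
def Pre_reorder_instances_py (hosts : List String) : Prop :=
  ∀ k ∈ PySem.List.dedup (hosts.map pvPfx),
    hosts.countP (fun h => pvPfx h == k) =
      hosts.length / (PySem.List.dedup (hosts.map pvPfx)).length +
        (if pvRank hosts k < hosts.length % (PySem.List.dedup (hosts.map pvPfx)).length then 1
         else 0)
instance (hosts : List String) : Decidable (Pre_reorder_instances_py hosts) := by
  unfold Pre_reorder_instances_py; infer_instance

def pvWitness_reorder_instances_py : List String := ["abc-h1", "xyz-h2", "abc-h3", "xyz-h4"]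

def Spec_reorder_instances_py (hosts : List String) (out : List String) : Prop := out = reorder_instances_py_alt hosts
instance (hosts : List String) (out : List String) : Decidable (Spec_reorder_instances_py hosts out) := by unfold Spec_reorder_instances_py; infer_instance

-- ===== CLAIM (what is proved, stated in full; the proofs are below) =====
def Claim_equal_reorder_instances_py : Prop := ∀ (hosts : List String), Dom_reorder_instances_py hosts → Pre_reorder_instances_py hosts → Spec_reorder_instances_py hosts (reorder_instances_py hosts)

-- ===== LEMMAS AND PROOFS =====

-- the sorted list of datacenter prefixes occurring in hosts
def pvKeys (hosts : List String) : List String :=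
  PySem.List.sorted (PySem.List.dedup (hosts.map pvPfx)) (fun x => x) false


-- the per-DC group, in host order, and the reversed groups in sorted-key order
def pvGrp (hosts : List String) (k : String) : List String := hosts.filter (fun h => pvPfx h == k)
def pvRevs (hosts : List String) : List (List String) :=
  (pvKeys hosts).map (fun k => (pvGrp hosts k).reverse)
-- the element both programs emit at step i, and the canonical prefix of length m
def pvEmit (hosts : List String) (i : Nat) : String :=
  ((pvRevs hosts).getD (i % (pvKeys hosts).length) []).getD (i / (pvKeys hosts).length) ""
def pvCanon (hosts : List String) (m : Nat) : List String := (List.range m).map (pvEmit hosts)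

-- the dict both ports build (they are the same fold, see pvBuild_eq)
def pvBuild (hosts : List String) : PySem.Dict String (List String) :=
  hosts.foldl
    (fun d h =>
      let d := if d.contains (pvPfx h) then d else d.insert (pvPfx h) ([] : List String)
      d.modify (pvPfx h) [] (fun l => l ++ [h]))
    PySem.Dict.empty

theorem pvBuild_keys (hosts : List String) :
    (pvBuild hosts).keys = PySem.List.dedup (hosts.map pvPfx) := by
  induction hosts using List.reverseRecOn with
  | nil => rfl
  | append_singleton l h ih =>
    rw [pvBuild, List.foldl_append]
    rw [show l.foldl _ PySem.Dict.empty = pvBuild l from rfl]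
    simp only [List.foldl_cons, List.foldl_nil]
    rw [List.map_append, PySem.List.dedup_eq_ofList, PySem.Set.ofList_eq_foldl, List.foldl_append,
      ← PySem.Set.ofList_eq_foldl, ← PySem.List.dedup_eq_ofList]
    simp only [List.map_cons, List.map_nil, List.foldl_cons, List.foldl_nil]
    have hmemiff : (pvBuild l).contains (pvPfx h) = true ↔ pvPfx h ∈ PySem.List.dedup (List.map pvPfx l) := by
      rw [PySem.Dict.contains_iff_mem_keys, ih]
    by_cases hc : (pvBuild l).contains (pvPfx h)
    · rw [if_pos hc, PySem.Dict.keys_modify, PySem.Dict.keys_insert_of_contains _ _ hc, ih,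
        PySem.Set.add]
      have hmem : pvPfx h ∈ PySem.List.dedup (List.map pvPfx l) := hmemiff.mp hc
      simp only [PySem.List.mem_dedup, List.mem_map] at hmem
      simp [hmem]
    · rw [if_neg hc, PySem.Dict.keys_modify]
      have hc1 : ((pvBuild l).insert (pvPfx h) ([] : List String)).contains (pvPfx h) = true := by
        simp
      rw [PySem.Dict.keys_insert_of_contains _ _ hc1,
        PySem.Dict.keys_insert_of_not_contains _ _ (by simpa using hc), ih, PySem.Set.add]
      have hmem : pvPfx h ∉ PySem.List.dedup (List.map pvPfx l) := fun hm => hc (hmemiff.mpr hm)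
      simp only [PySem.List.mem_dedup, List.mem_map, not_exists, not_and] at hmem
      simp
      exact hmem

theorem pvBuild_getD (hosts : List String) (k : String) :
    (pvBuild hosts).getD k [] = pvGrp hosts k := by
  induction hosts using List.reverseRecOn generalizing k with
  | nil => rfl
  | append_singleton l h ih =>
    rw [pvBuild, List.foldl_append]
    rw [show l.foldl _ PySem.Dict.empty = pvBuild l from rfl]
    simp only [List.foldl_cons, List.foldl_nil]
    rw [pvGrp, List.filter_append, ← pvGrp]
    by_cases hc : (pvBuild l).contains (pvPfx h)
    · rw [if_pos hc, PySem.Dict.getD_modify]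
      by_cases hk : k = pvPfx h
      · subst hk
        rw [if_pos rfl, ih]
        simp [pvGrp]
      · rw [if_neg hk, ih]
        simp [pvGrp, Ne.symm hk]
    · rw [if_neg hc, PySem.Dict.getD_modify]
      by_cases hk : k = pvPfx h
      · subst hk
        rw [if_pos rfl, PySem.Dict.getD_insert, if_pos rfl]
        have hnil : pvGrp l (pvPfx h) = [] := by
          rw [pvGrp, List.filter_eq_nil_iff]
          intro x hx
          simp only [beq_iff_eq]
          intro hpx
          refine hc ((PySem.Dict.contains_iff_mem_keys _ _).mpr
            (by rw [pvBuild_keys]; simp only [PySem.List.mem_dedup, List.mem_map]; exact ⟨x, hx, hpx⟩))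
        simp only [pvGrp, List.filter_eq_nil_iff] at hnil
        simp only [beq_iff_eq] at hnil
        simp [pvGrp]
        exact hnil
      · rw [if_neg hk, PySem.Dict.getD_insert, if_neg hk, ih]
        simp [pvGrp, Ne.symm hk]

-- value of pvRevs at an in-range index
theorem pvRv (hosts : List String) (j : Nat) (hj : j < (pvKeys hosts).length) :
    (pvRevs hosts).getD j [] = (pvGrp hosts ((pvKeys hosts).getD j "")).reverse := by
  rw [pvRevs, List.getD_eq_getElem _ _ (by simpa [pvRevs] using hj), List.getElem_map,
    List.getD_eq_getElem _ _ hj]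

theorem pvCanon_succ (hosts : List String) (m : Nat) :
    pvCanon hosts (m + 1) = pvCanon hosts m ++ [pvEmit hosts m] := by
  rw [pvCanon, List.range_succ, List.map_append, List.map_singleton, pvCanon]

theorem pvCanon_length (hosts : List String) (m : Nat) : (pvCanon hosts m).length = m := by
  simp [pvCanon]

theorem pvKeys_pairwise (hosts : List String) : (pvKeys hosts).Pairwise (· < ·) := by
  have h := PySem.List.sorted_ofList_pairwise_lt (hosts.map pvPfx)
  rw [pvKeys, PySem.List.dedup_eq_ofList]
  exact h

theorem pvKeys_nodup (hosts : List String) : (pvKeys hosts).Nodup := by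
  have h := PySem.List.sorted_ofList_pairwise_lt (hosts.map pvPfx)
  rw [pvKeys, PySem.List.dedup_eq_ofList]
  exact h.imp (fun hlt => ne_of_lt hlt)

theorem pvD_pos (hosts : List String) (hn : hosts ≠ []) : 0 < (pvKeys hosts).length := by
  rw [List.length_pos_iff, Ne, pvKeys, PySem.List.sorted_eq_nil_iff]
  intro hdd
  have : hosts.map pvPfx = [] := by
    by_contra hne
    obtain ⟨x, hx⟩ := List.exists_mem_of_ne_nil _ hne
    exact absurd (hdd ▸ (PySem.List.mem_dedup _ _).mpr hx) (List.not_mem_nil)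
  exact hn (by simpa using this)

-- division bracket used for the in-range proof of each pop
theorem pvDivLt (d i n : Nat) (_hd : 0 < d) (hin : i < n) :
    i / d < n / d + (if i % d < n % d then 1 else 0) := by
  by_cases hc : i % d < n % d
  · simp only [if_pos hc]
    exact Nat.lt_succ_of_le (Nat.div_le_div_right hin.le)
  · simp only [if_neg hc, Nat.add_zero]
    by_contra hge
    rw [Nat.not_lt] at hge
    have heq : i / d = n / d := le_antisymm (Nat.div_le_div_right hin.le) hge
    have h1 := Nat.div_add_mod i d
    have h2 := Nat.div_add_mod n d
    rw [heq] at h1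
    omega

-- the number of pops group j has seen after i steps
def pvC (hosts : List String) (j i : Nat) : Nat :=
  i / (pvKeys hosts).length + (if j < i % (pvKeys hosts).length then 1 else 0)

theorem pvC_succ (d i j : Nat) (hd : 0 < d) (hj : j < d) :
    (i+1)/d + (if j < (i+1) % d then 1 else 0)
      = if j = i % d then (i/d + (if j < i % d then 1 else 0)) + 1
        else i/d + (if j < i % d then 1 else 0) := by
  have h1 : i % d < d := Nat.mod_lt _ hd
  have hdm := Nat.div_add_mod i d
  by_cases hend : i % d + 1 = d
  · have hi1 : i + 1 = d * (i / d + 1) := by rw [Nat.mul_succ]; omega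
    have hdiv : (i + 1) / d = i / d + 1 := by rw [hi1, Nat.mul_div_cancel_left _ hd]
    have hmod : (i + 1) % d = 0 := by rw [hi1, Nat.mul_mod_right]
    rw [hdiv, hmod]
    split_ifs <;> omega
  · have hi1 : i + 1 = (i % d + 1) + d * (i / d) := by omega
    have hdiv : (i + 1) / d = i / d := by
      rw [hi1, Nat.add_mul_div_left _ _ hd, Nat.div_eq_of_lt (by omega), Nat.zero_add]
    have hmod : (i + 1) % d = i % d + 1 := by
      rw [hi1, Nat.add_mul_mod_self_left, Nat.mod_eq_of_lt (by omega)]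
    rw [hdiv, hmod]
    split_ifs <;> omega

-- count of positions hitting group j, elements strictly below l[j] in a strictly sorted list
theorem pvCountP_lt_of_pairwise (l : List String) (hp : l.Pairwise (· < ·)) :
    ∀ j, j < l.length → l.countP (fun x => decide (x < l.getD j "")) = j := by
  induction l with
  | nil => intro j hj; simp at hj
  | cons a t ih =>
    rw [List.pairwise_cons] at hp
    intro j hj
    cases j with
    | zero =>
      rw [List.getD_cons_zero, List.countP_eq_zero]
      intro x hx
      rcases List.mem_cons.mp hx with rfl | hxt
      · simp only [decide_eq_true_eq]; exact lt_irrefl x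
      · simp only [decide_eq_true_eq]; exact not_lt_of_gt (hp.1 x hxt)
    | succ j =>
      have hjt : j < t.length := by simpa using hj
      rw [List.getD_cons_succ, List.countP_cons, ih hp.2 j hjt]
      have ha : a < t.getD j "" := by
        rw [List.getD_eq_getElem _ _ hjt]
        exact hp.1 _ (List.getElem_mem hjt)
      rw [decide_eq_true ha, if_pos rfl]

theorem pvRank_at (hosts : List String) (j : Nat) (hj : j < (pvKeys hosts).length) :
    pvRank hosts ((pvKeys hosts).getD j "") = j := by
  rw [pvRank]
  have h1 : (PySem.List.dedup (hosts.map pvPfx)).countP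
        (fun k' => decide (k'.toList < ((pvKeys hosts).getD j "").toList))
      = (PySem.List.dedup (hosts.map pvPfx)).countP
        (fun k' => decide (k' < (pvKeys hosts).getD j "")) := by
    refine List.countP_congr (fun k' _ => ?_)
    simp only [decide_eq_true_eq]
    exact String.lt_iff_toList_lt.symm
  rw [h1, (PySem.List.sorted_perm (PySem.List.dedup (hosts.map pvPfx)) (fun x => x) false).symm.countP_eq]
  exact pvCountP_lt_of_pairwise (pvKeys hosts) (pvKeys_pairwise hosts) j hj

theorem pvDedup_length (hosts : List String) :
    (PySem.List.dedup (hosts.map pvPfx)).length = (pvKeys hosts).length :=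
  (PySem.List.length_sorted _ _ _).symm

-- the per-DC group length under Pre_
theorem pvLen (hosts : List String) (hpre : Pre_reorder_instances_py hosts) (j : Nat)
    (hj : j < (pvKeys hosts).length) :
    ((pvRevs hosts).getD j []).length
      = hosts.length / (pvKeys hosts).length
        + (if j < hosts.length % (pvKeys hosts).length then 1 else 0) := by
  rw [pvRv hosts j hj, List.length_reverse, pvGrp, ← List.countP_eq_length_filter]
  have hmem : (pvKeys hosts).getD j "" ∈ PySem.List.dedup (hosts.map pvPfx) := by
    rw [List.getD_eq_getElem _ _ hj]
    exact (PySem.List.mem_sorted _ _ _ _).mp (List.getElem_mem hj)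
  have := hpre _ hmem
  rw [pvRank_at hosts j hj, pvDedup_length] at this
  exact this

-- A's main loop: step function (dcs already identified with pvKeys)
def pvAStep (hosts : List String) (st : PySem.Dict String (List String) × List String) (i : Int) :
    PySem.Dict String (List String) × List String :=
  let key := PySem.List.pyGetD (pvKeys hosts) (PySem.Int.mod i ((pvKeys hosts).length : Int)) ""
  match PySem.List.pop? (st.1.getD key []) (-1) with
  | some (h, rest) => (st.1.insert key rest, st.2 ++ [h])
  | none => st

theorem pvALoop (hosts : List String) (hpre : Pre_reorder_instances_py hosts) :
    ∀ i, i ≤ hosts.length →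
      ((((List.range i).map (fun k : Nat => (k : Int))).foldl (pvAStep hosts) (pvBuild hosts, [])).2
          = pvCanon hosts i)
      ∧ ∀ j, j < (pvKeys hosts).length →
          ((((List.range i).map (fun k : Nat => (k : Int))).foldl (pvAStep hosts) (pvBuild hosts, [])).1).getD
              ((pvKeys hosts).getD j "") []
            = (((pvRevs hosts).getD j []).drop (pvC hosts j i)).reverse := by
  intro i
  induction i with
  | zero =>
    intro _
    constructor
    · simp [pvCanon]
    · intro j hj
      simp only [List.range_zero, List.map_nil, List.foldl_nil]
      rw [pvBuild_getD, pvRv hosts j hj, pvC]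
      simp
  | succ i ih =>
    intro hi
    obtain ⟨ih1, ih2⟩ := ih (by omega)
    have hne : hosts ≠ [] := by intro h; rw [h] at hi; simp at hi
    have hd : 0 < (pvKeys hosts).length := pvD_pos hosts hne
    have hin : i < hosts.length := by omega
    have hjm : i % (pvKeys hosts).length < (pvKeys hosts).length := Nat.mod_lt _ hd
    rw [List.range_succ, List.map_append, List.foldl_append, List.map_singleton,
      List.foldl_cons, List.foldl_nil]
    set st := (((List.range i).map (fun k : Nat => (k : Int))).foldl (pvAStep hosts)
      (pvBuild hosts, [])) with hst
    set L := (pvRevs hosts).getD (i % (pvKeys hosts).length) [] with hL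
    have hCi : pvC hosts (i % (pvKeys hosts).length) i = i / (pvKeys hosts).length := by
      simp [pvC]
    have hlt : i / (pvKeys hosts).length < L.length := by
      rw [hL, pvLen hosts hpre _ hjm]
      exact pvDivLt _ i hosts.length hd hin
    have hgetkey : st.1.getD ((pvKeys hosts).getD (i % (pvKeys hosts).length) "") []
        = (L.drop (i / (pvKeys hosts).length)).reverse := by
      rw [ih2 _ hjm, hCi]
    have hdropc : L.drop (i / (pvKeys hosts).length)
        = L[i / (pvKeys hosts).length] :: L.drop (i / (pvKeys hosts).length + 1) :=
      List.drop_eq_getElem_cons hlt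
    have hstep : pvAStep hosts st (i : Int)
        = (st.1.insert ((pvKeys hosts).getD (i % (pvKeys hosts).length) "")
              ((L.drop (i / (pvKeys hosts).length + 1)).reverse),
           st.2 ++ [L[i / (pvKeys hosts).length]]) := by
      rw [pvAStep]
      simp only [PySem.Int.mod_natCast, PySem.List.pyGetD_natCast]
      rw [hgetkey, hdropc, List.reverse_cons, PySem.List.pop?_last]
    rw [hstep]
    constructor
    · show st.2 ++ [L[i / (pvKeys hosts).length]] = pvCanon hosts (i + 1)
      rw [ih1, pvCanon_succ]
      congr 1
      rw [pvEmit, ← hL, List.getD_eq_getElem _ _ hlt]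
    · intro j hj
      show (st.1.insert ((pvKeys hosts).getD (i % (pvKeys hosts).length) "")
          ((L.drop (i / (pvKeys hosts).length + 1)).reverse)).getD
            ((pvKeys hosts).getD j "") []
        = (((pvRevs hosts).getD j []).drop (pvC hosts j (i + 1))).reverse
      rw [PySem.Dict.getD_insert]
      have hkiff : ((pvKeys hosts).getD j "" = (pvKeys hosts).getD (i % (pvKeys hosts).length) "")
          ↔ j = i % (pvKeys hosts).length := by
        rw [List.getD_eq_getElem _ _ hj, List.getD_eq_getElem _ _ hjm]
        exact (pvKeys_nodup hosts).getElem_inj_iff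
      have hCsucc := pvC_succ (pvKeys hosts).length i j hd hj
      by_cases hjeq : j = i % (pvKeys hosts).length
      · rw [if_pos (hkiff.mpr hjeq)]
        have : pvC hosts j (i + 1) = i / (pvKeys hosts).length + 1 := by
          rw [pvC, hCsucc, if_pos hjeq, hjeq]
          simp
        rw [this, hjeq, ← hL]
      · rw [if_neg (fun h => hjeq (hkiff.mp h))]
        have : pvC hosts j (i + 1) = pvC hosts j i := by
          rw [pvC, hCsucc, if_neg hjeq, pvC]
        rw [this, ih2 _ hj]

-- B's inner pass emits the canonical elements of round r
theorem pvInner_spec (hosts : List String) (r : Nat) :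
    ∀ m t, (pvKeys hosts).length - t = m → t ≤ (pvKeys hosts).length →
      r * (pvKeys hosts).length + t ≤ hosts.length →
      pvBInner hosts.length r ((pvRevs hosts).drop t)
          (pvCanon hosts (r * (pvKeys hosts).length + t))
        = pvCanon hosts
            (min hosts.length (r * (pvKeys hosts).length + (pvKeys hosts).length)) := by
  intro m
  induction m with
  | zero =>
    intro t hm ht h
    have htd : t = (pvKeys hosts).length := by omega
    subst htd
    rw [List.drop_of_length_le (by simp [pvRevs]), pvBInner, Nat.min_eq_right h]
  | succ m ih =>
    intro t hm ht h
    have htlt : t < (pvKeys hosts).length := by omega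
    have hd : 0 < (pvKeys hosts).length := by omega
    have htrv : t < (pvRevs hosts).length := by simpa [pvRevs] using htlt
    rw [List.drop_eq_getElem_cons htrv, pvBInner]
    by_cases hn : r * (pvKeys hosts).length + t = hosts.length
    · rw [if_pos (by rw [pvCanon_length, hn]), hn, Nat.min_eq_left (by omega)]
    · rw [if_neg (by rw [pvCanon_length]; exact hn)]
      have hemit : PySem.List.pyGetD (pvRevs hosts)[t] (r : Int) ""
          = pvEmit hosts (r * (pvKeys hosts).length + t) := by
        rw [PySem.List.pyGetD_natCast, pvEmit]
        have hmod : (r * (pvKeys hosts).length + t) % (pvKeys hosts).length = t := by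
          rw [Nat.mul_comm r, Nat.mul_add_mod, Nat.mod_eq_of_lt htlt]
        have hdiv : (r * (pvKeys hosts).length + t) / (pvKeys hosts).length = r := by
          rw [Nat.mul_comm r, Nat.mul_add_div hd, Nat.div_eq_of_lt htlt, Nat.add_zero]
        rw [hmod, hdiv, List.getD_eq_getElem _ _ htrv]
      rw [hemit, ← pvCanon_succ]
      have := ih (t + 1) (by omega) (by omega) (by omega)
      rw [show r * (pvKeys hosts).length + t + 1 = r * (pvKeys hosts).length + (t + 1) from rfl]
      exact this

theorem pvBOuter_full (n : Nat) (revs : List (List String)) (fuel : Nat) (acc : List String)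
    (r : Nat) (h : ¬ acc.length < n) : pvBOuter n revs fuel acc r = acc := by
  cases fuel <;> simp [pvBOuter, h]

theorem pvOuter_spec (hosts : List String) (hd : 0 < (pvKeys hosts).length) :
    ∀ fuel r, r * (pvKeys hosts).length ≤ hosts.length →
      hosts.length ≤ r * (pvKeys hosts).length + fuel * (pvKeys hosts).length →
      pvBOuter hosts.length (pvRevs hosts) fuel
          (pvCanon hosts (r * (pvKeys hosts).length)) r
        = pvCanon hosts hosts.length := by
  intro fuel
  induction fuel with
  | zero =>
    intro r h1 h2
    have : r * (pvKeys hosts).length = hosts.length := by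
      simp only [Nat.zero_mul] at h2; omega
    rw [this, pvBOuter]
  | succ fuel ih =>
    intro r h1 h2
    rw [pvBOuter]
    by_cases hlt : r * (pvKeys hosts).length < hosts.length
    · rw [if_pos (by rw [pvCanon_length]; exact hlt)]
      have hinner := pvInner_spec hosts r ((pvKeys hosts).length) 0 (by omega) (by omega)
        (by omega)
      simp only [List.drop_zero, Nat.add_zero] at hinner
      rw [hinner]
      by_cases hfin : hosts.length ≤ r * (pvKeys hosts).length + (pvKeys hosts).length
      · rw [Nat.min_eq_left hfin]
        exact pvBOuter_full _ _ _ _ _ (by rw [pvCanon_length]; omega)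
      · rw [Nat.min_eq_right (by omega)]
        have : r * (pvKeys hosts).length + (pvKeys hosts).length
            = (r + 1) * (pvKeys hosts).length := by rw [Nat.succ_mul]
        rw [this]
        refine ih (r + 1) (by omega) ?_
        rw [Nat.succ_mul] at h2 ⊢
        omega
    · rw [if_neg (by rw [pvCanon_length]; exact hlt)]
      have : r * (pvKeys hosts).length = hosts.length := by omega
      rw [this]

theorem pvA_eq_canon (hosts : List String) (hpre : Pre_reorder_instances_py hosts) :
    reorder_instances_py hosts = pvCanon hosts hosts.length := by
  have hA : (hosts.map (fun host => (pvPfx host, host))).foldl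
      (fun d p =>
        let d := if d.contains p.1 then d else d.insert p.1 ([] : List String)
        d.modify p.1 [] (fun l => l ++ [p.2]))
      PySem.Dict.empty = pvBuild hosts := by
    rw [List.foldl_map]; rfl
  have hrange : PySem.List.pyRange 0 (hosts.length : Int) 1
      = (List.range hosts.length).map (fun k : Nat => (k : Int)) := by
    rw [PySem.List.pyRange_one]
    simp
  show ((PySem.List.pyRange 0 (hosts.length : Int) 1).foldl _
      ((hosts.map (fun host => (pvPfx host, host))).foldl _ PySem.Dict.empty, [])).2 = _
  rw [hA, hrange]
  have hdcs : PySem.List.sorted (pvBuild hosts).keys (fun x => x) false = pvKeys hosts := by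
    rw [pvBuild_keys, pvKeys]
  show (((List.range hosts.length).map (fun k : Nat => (k : Int))).foldl
      (fun (st : PySem.Dict String (List String) × List String) i =>
        let key := PySem.List.pyGetD (PySem.List.sorted (pvBuild hosts).keys (fun x => x) false)
          (PySem.Int.mod i ((PySem.List.sorted (pvBuild hosts).keys (fun x => x) false).length : Int)) ""
        match PySem.List.pop? (st.1.getD key []) (-1) with
        | some (h, rest) => (st.1.insert key rest, st.2 ++ [h])
        | none => st)
      (pvBuild hosts, [])).2 = _
  rw [hdcs]
  exact (pvALoop hosts hpre hosts.length le_rfl).1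

theorem pvB_eq_canon (hosts : List String) :
    reorder_instances_py_alt hosts = pvCanon hosts hosts.length := by
  have hgroups : hosts.foldl
      (fun d h => (d.setdefault (pvPfx h) []).modify (pvPfx h) [] (fun l => l ++ [h]))
      PySem.Dict.empty = pvBuild hosts := by
    rw [pvBuild]
    congr 1
    funext d h
    show (d.setdefault (pvPfx h) []).modify (pvPfx h) [] (fun l => l ++ [h])
        = ((if d.contains (pvPfx h) then d else d.insert (pvPfx h) [])).modify (pvPfx h) []
            (fun l => l ++ [h])
    congr 1
    by_cases hc : d.contains (pvPfx h)
    · rw [if_pos hc, PySem.Dict.setdefault_of_contains _ _ hc]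
    · rw [if_neg hc, PySem.Dict.setdefault_of_not_contains _ _ (by simpa using hc)]
  show pvBOuter hosts.length _ hosts.length [] 0 = _
  rw [hgroups]
  have hrevs : (PySem.List.sorted (pvBuild hosts).keys (fun x => x) false).map
      (fun k => ((pvBuild hosts).getD k []).reverse) = pvRevs hosts := by
    rw [pvRevs, pvBuild_keys]
    exact List.map_congr_left (fun k _ => by rw [pvBuild_getD])
  rw [hrevs]
  rcases eq_or_ne hosts [] with hnil | hne
  · subst hnil; rfl
  · have hd := pvD_pos hosts hne
    have h0 : ([] : List String) = pvCanon hosts (0 * (pvKeys hosts).length) := by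
      simp [pvCanon]
    rw [h0]
    exact pvOuter_spec hosts hd hosts.length 0 (by omega)
      (by simpa using Nat.le_mul_of_pos_right hosts.length hd)

-- ===== VERDICT (by name: the statement is the Claim_ definition above) =====
theorem reorder_instances_py_spec : Claim_equal_reorder_instances_py := by
  intro hosts _ hpre
  unfold Spec_reorder_instances_py
  rw [pvA_eq_canon hosts hpre, pvB_eq_canon hosts]
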